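-- pv_equiv track=rewrite | github.com/Lucenix/LA2 | treino1/hacker.py | hacker
-- ===== SOURCE A (Python) =====
-- def hacker(log):
--     dic = {}
--     for num,email in log:
--         if email not in dic:
--             dic[email] = list(num)
--         else:
--             for i in range(len(num)):
--                 if num[i] != '*':
--                     dic[email][i] = num[i]
--
--     listy = ["".join(dic[x]) for x in dic]
--     return sorted(zip(listy,dic), key = lambda n: (n[0].count('*'), n[1]))
-- ===== SOURCE B (Python) =====
-- def _merge(nums):
--     # position-major merge: the first entry supplies the base char; each later
--     # entry overwrites position j when it reaches j with a non-'*' char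
--     first = nums[0]
--     chars = []
--     for j in range(len(first)):
--         c = first[j]
--         for n in nums[1:]:
--             if j < len(n) and n[j] != '*':
--                 c = n[j]
--         chars.append(c)
--     return ''.join(chars)
--
--
-- def hacker(log):
--     groups = {}
--     for num, email in log:
--         groups.setdefault(email, []).append(num)
--     out = [(_merge(nums), email) for email, nums in groups.items()]
--     return sorted(out, key=lambda t: (t[0].count('*'), t[1]))
-- ===== Notes on version B (the rewrite author's own statement) =====
-- stated objective: alternative
-- what changed: B first groups all numbers per email in one pass, then merges each group position-by-position (last non-'*' char wins) instead of mutating a per-email char list in place entry-by-entry; the dict-mutation inner loop disappears.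
-- outside the precondition, e.g. on hacker([('12', 'a'), ('345', 'a')]): A raises IndexError, B returns [('34', 'a')]
import Mathlib
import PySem

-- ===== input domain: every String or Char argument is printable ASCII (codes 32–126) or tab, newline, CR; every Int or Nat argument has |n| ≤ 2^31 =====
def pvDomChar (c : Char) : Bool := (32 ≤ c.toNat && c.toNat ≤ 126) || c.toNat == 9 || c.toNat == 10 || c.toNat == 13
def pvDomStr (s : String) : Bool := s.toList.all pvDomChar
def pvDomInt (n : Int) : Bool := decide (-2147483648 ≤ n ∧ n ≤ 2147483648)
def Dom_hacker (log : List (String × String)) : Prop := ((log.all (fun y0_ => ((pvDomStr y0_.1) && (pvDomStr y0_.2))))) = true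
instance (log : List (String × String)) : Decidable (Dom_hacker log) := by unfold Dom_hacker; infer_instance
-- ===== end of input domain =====

-- B groups the numbers per email first and then merges each group position-by-position,
-- instead of A's entry-by-entry in-place mutation of a per-email char list (alternative decomposition, same cost).

-- ===== PORT A =====
-- inner loop of A: for i in range(len(num)): if num[i] != '*': dic[email][i] = num[i]
-- (num[i] is always in range here, so pyGetD's default is never read; the list assignment
--  dic[email][i] = … raises IndexError when i ≥ len — List.set is a no-op there, and
--  Pre_hacker excludes exactly those inputs)
def applyEntry (num : String) (l : List Char) : List Char :=
  (PySem.List.pyRange 0 (num.toList.length : Int) 1).foldl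
    (fun acc i =>
      if PySem.List.pyGetD num.toList i '*' ≠ '*'
      then acc.set i.toNat (PySem.List.pyGetD num.toList i '*') else acc) l

def hacker (log : List (String × String)) : List (String × String) :=
  let dic := log.foldl
    (fun d p => if !d.contains p.2 then d.insert p.2 p.1.toList
                else d.modify p.2 [] (applyEntry p.1)) PySem.Dict.empty
  let listy := dic.keys.map (fun x => String.ofList (dic.getD x []))  -- "".join(dic[x]); x is always a key
  PySem.List.sorted2 (listy.zip dic.keys) (fun n => PySem.Str.count n.1 "*") (fun n => n.2)

-- ===== PORT B =====
-- _merge(nums): position-major merge; nums[0] is the base (every group is nonempty, so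
-- pyGetD's default "" is never read; the inner pyGetD default '*' is read only when
-- j ≥ len(n), where the guard 'j < len(n) and' makes the condition False anyway)
def mergeGroup (nums : List String) : String :=
  let fc := (PySem.List.pyGetD nums 0 "").toList
  String.ofList ((PySem.List.pyRange 0 (fc.length : Int) 1).map (fun j =>
    (nums.drop 1).foldl   -- for n in nums[1:]
      (fun c n =>
        if j < (n.toList.length : Int) ∧ PySem.List.pyGetD n.toList j '*' ≠ '*'
        then PySem.List.pyGetD n.toList j '*' else c)
      (PySem.List.pyGetD fc j '*')))

def hacker_alt (log : List (String × String)) : List (String × String) :=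
  let groups := log.foldl (fun d p => d.modify p.2 [] (fun ls => ls ++ [p.1])) PySem.Dict.empty
  PySem.List.sorted2 (groups.items.map (fun q => (mergeGroup q.2, q.1)))
    (fun n => PySem.Str.count n.1 "*") (fun n => n.2)

-- ===== PRECONDITION & SPEC =====
-- Pre_hacker excludes exactly the inputs on which A raises IndexError: some entry carrying a
-- non-'*' char at a position not below the length of the first entry logged for its email.
def Pre_hacker (log : List (String × String)) : Prop :=
  ∀ p ∈ log, ∀ i : Nat, i < p.1.toList.length → p.1.toList.getD i '*' ≠ '*' →
    i < ((((log.filter (fun q => q.2 == p.2)).map (fun q => q.1)).headD "").toList.length)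
instance (log : List (String × String)) : Decidable (Pre_hacker log) := by unfold Pre_hacker; infer_instance

def pvWitness_hacker : (List (String × String)) := [("12*", "a"), ("*3", "a"), ("777", "b")]

def Spec_hacker (log : List (String × String)) (out : List (String × String)) : Prop := out = hacker_alt log
instance (log : List (String × String)) (out : List (String × String)) : Decidable (Spec_hacker log out) := by unfold Spec_hacker; infer_instance

-- ===== CLAIM (what is proved, stated in full; the proofs are below) =====
def Claim_equal_hacker : Prop := ∀ (log : List (String × String)), Dom_hacker log → Pre_hacker log → Spec_hacker log (hacker log)
-- ===== LEMMAS AND PROOFS =====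

theorem setRange_len (cs : List Char) (k : Nat) : ∀ l : List Char,
    ((List.range k).foldl (fun acc i => if cs.getD i '*' ≠ '*' then acc.set i (cs.getD i '*') else acc) l).length = l.length := by
  induction k with
  | zero => intro l; rfl
  | succ k ih =>
    intro l
    rw [List.range_succ, List.foldl_append]
    simp only [List.foldl_cons, List.foldl_nil]
    split
    · rw [List.length_set]; exact ih l
    · exact ih l

theorem setRange_getD (cs : List Char) (k : Nat) : ∀ (l : List Char) (j : Nat),
    ((List.range k).foldl (fun acc i => if cs.getD i '*' ≠ '*' then acc.set i (cs.getD i '*') else acc) l).getD j '*' =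
      if j < k ∧ j < l.length ∧ cs.getD j '*' ≠ '*' then cs.getD j '*' else l.getD j '*' := by
  induction k with
  | zero => intro l j; simp
  | succ k ih =>
    intro l j
    rw [List.range_succ, List.foldl_append]
    simp only [List.foldl_cons, List.foldl_nil]
    by_cases hc : cs.getD k '*' ≠ '*'
    · rw [if_pos hc]
      have hlen := setRange_len cs k l
      by_cases hj : j = k
      · subst hj
        by_cases hl : j < l.length
        · rw [List.getD_eq_getElem?_getD, List.getElem?_set_self (by rw [hlen]; exact hl)]
          rw [if_pos ⟨Nat.lt_succ_self j, hl, hc⟩]; rfl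
        · rw [List.getD_eq_getElem?_getD, List.getElem?_set, if_pos rfl,
              if_neg (by rw [hlen]; exact hl), if_neg (by tauto)]
          exact (List.getD_eq_default l '*' (by omega)).symm
      · rw [List.getD_eq_getElem?_getD, List.getElem?_set_ne (fun h => hj h.symm),
            ← List.getD_eq_getElem?_getD, ih l j]
        by_cases h1 : j < k ∧ j < l.length ∧ cs.getD j '*' ≠ '*'
        · rw [if_pos h1, if_pos ⟨by omega, h1.2⟩]
        · rw [if_neg h1, if_neg (by rintro ⟨a,b,c⟩; exact h1 ⟨by omega, b, c⟩)]
    · rw [if_neg hc, ih l j]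
      by_cases h1 : j < k ∧ j < l.length ∧ cs.getD j '*' ≠ '*'
      · rw [if_pos h1, if_pos ⟨by omega, h1.2⟩]
      · rw [if_neg h1, if_neg (by rintro ⟨a,b,c⟩; apply h1; refine ⟨?_, b, c⟩; rcases Nat.lt_succ_iff_lt_or_eq.mp a with h|h; exact h; exact absurd (h ▸ c) hc)]


theorem applyEntry_eq (num : String) (l : List Char) :
    applyEntry num l = (List.range num.toList.length).foldl
      (fun acc i => if num.toList.getD i '*' ≠ '*' then acc.set i (num.toList.getD i '*') else acc) l := by
  unfold applyEntry
  rw [PySem.List.pyRange_zero_natCast, List.foldl_map]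
  simp only [PySem.List.pyGetD_natCast, Int.toNat_natCast]

theorem applyEntry_length (num : String) (l : List Char) :
    (applyEntry num l).length = l.length := by
  rw [applyEntry_eq]; exact setRange_len _ _ l

theorem applyEntry_getD (num : String) (l : List Char) (j : Nat)
    (H : ∀ i, i < num.toList.length → num.toList.getD i '*' ≠ '*' → i < l.length) :
    (applyEntry num l).getD j '*' =
      if j < num.toList.length ∧ num.toList.getD j '*' ≠ '*'
      then num.toList.getD j '*' else l.getD j '*' := by
  rw [applyEntry_eq, setRange_getD]
  by_cases h1 : j < num.toList.length ∧ num.toList.getD j '*' ≠ '*'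
  · rw [if_pos ⟨h1.1, H j h1.1 h1.2, h1.2⟩, if_pos h1]
  · rw [if_neg (by tauto), if_neg h1]

theorem foldl_applyEntry_length (rest : List String) (l : List Char) :
    (rest.foldl (fun acc n => applyEntry n acc) l).length = l.length := by
  induction rest generalizing l with
  | nil => rfl
  | cons n rest ih => simpa [applyEntry_length] using ih (applyEntry n l)

theorem foldl_applyEntry_getD (rest : List String) (l : List Char) (j : Nat)
    (H : ∀ n ∈ rest, ∀ i, i < n.toList.length → n.toList.getD i '*' ≠ '*' → i < l.length) :
    (rest.foldl (fun acc n => applyEntry n acc) l).getD j '*' =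
      rest.foldl (fun c n =>
        if j < n.toList.length ∧ n.toList.getD j '*' ≠ '*' then n.toList.getD j '*' else c)
        (l.getD j '*') := by
  induction rest generalizing l with
  | nil => rfl
  | cons n rest ih =>
    simp only [List.foldl_cons]
    rw [ih (applyEntry n l)
        (fun m hm i hi hc => by rw [applyEntry_length]; exact H m (List.mem_cons_of_mem _ hm) i hi hc),
      applyEntry_getD n l j (fun i hi hc => H n (List.mem_cons_self ..) i hi hc)]


theorem merge_eq (f : String) (rest : List String)
    (H : ∀ n ∈ f :: rest, ∀ i, i < n.toList.length → n.toList.getD i '*' ≠ '*' → i < f.toList.length) :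
    String.ofList (rest.foldl (fun acc n => applyEntry n acc) f.toList) = mergeGroup (f :: rest) := by
  unfold mergeGroup
  simp only [List.drop_succ_cons, List.drop_zero]
  have h0 : PySem.List.pyGetD (f :: rest) 0 "" = f := by
    simpa using PySem.List.pyGetD_natCast (f :: rest) 0 ""
  rw [h0]
  apply congrArg
  rw [PySem.List.pyRange_zero_natCast, List.map_map]
  apply List.ext_getElem
  · rw [foldl_applyEntry_length]; simp
  · intro i h1 h2
    simp only [List.getElem_map, List.getElem_range, Function.comp_apply]
    rw [← List.getD_eq_getElem _ '*' h1, foldl_applyEntry_getD rest f.toList i (fun n hn => H n (List.mem_cons_of_mem _ hn))]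
    simp only [PySem.List.pyGetD_natCast, Nat.cast_lt]

def numsOf (e : String) (log : List (String × String)) : List String :=
  (log.filter (fun q => q.2 == e)).map (fun q => q.1)

def stepA (d : PySem.Dict String (List Char)) (p : String × String) : PySem.Dict String (List Char) :=
  if !d.contains p.2 then d.insert p.2 p.1.toList else d.modify p.2 [] (applyEntry p.1)

def groupFold (c : Bool) (l : List Char) (ns : List String) : List Char :=
  if c then ns.foldl (fun acc n => applyEntry n acc) l
  else match ns with
       | [] => []
       | f :: rest => rest.foldl (fun acc n => applyEntry n acc) f.toList

theorem numsOf_cons (e : String) (p : String × String) (log : List (String × String)) :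
    numsOf e (p :: log) = if p.2 = e then p.1 :: numsOf e log else numsOf e log := by
  by_cases h : p.2 = e
  · simp [numsOf, List.filter_cons, h]
  · simp [numsOf, List.filter_cons, h]

theorem A_getD (log : List (String × String)) (d : PySem.Dict String (List Char)) (e : String) :
    (log.foldl stepA d).getD e [] = groupFold (d.contains e) (d.getD e []) (numsOf e log) := by
  induction log generalizing d with
  | nil =>
    by_cases h : d.contains e
    · simp [groupFold, h, numsOf]
    · simp [groupFold, h, numsOf,
        PySem.Dict.getD_of_not_contains d ([] : List Char) (by simpa using h)]
  | cons p log ih =>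
    simp only [List.foldl_cons, ih, numsOf_cons]
    unfold stepA
    by_cases he : p.2 = e
    · subst he
      by_cases hd : d.contains p.2
      · rw [if_neg (by simp [hd]), PySem.Dict.contains_modify, PySem.Dict.getD_modify]
        simp only [beq_self_eq_true, Bool.true_or, if_pos rfl, if_pos hd]
        simp [groupFold, hd]
      · rw [if_pos (by simp [hd]), PySem.Dict.contains_insert, PySem.Dict.getD_insert]
        simp only [beq_self_eq_true, Bool.true_or, if_pos rfl]
        simp [groupFold, hd]
    · have hne : e ≠ p.2 := Ne.symm he
      have hb : (e == p.2) = false := by simpa using hne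
      by_cases hd : d.contains p.2
      · rw [if_neg (by simp [hd]), PySem.Dict.contains_modify, PySem.Dict.getD_modify,
          if_neg hne, if_neg he, hb, Bool.false_or]
      · rw [if_pos (by simp [hd]), PySem.Dict.contains_insert, PySem.Dict.getD_insert,
          if_neg hne, if_neg he, hb, Bool.false_or]

theorem A_keys (log : List (String × String)) (d : PySem.Dict String (List Char)) :
    (log.foldl stepA d).keys = PySem.Set.update d.keys (log.map (fun p => p.2)) := by
  induction log generalizing d with
  | nil => rfl
  | cons p log ih =>
    simp only [List.foldl_cons, ih, List.map_cons]
    unfold stepA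
    have hupd : PySem.Set.update d.keys (p.2 :: log.map (fun p => p.2))
        = PySem.Set.update (PySem.Set.add d.keys p.2) (log.map (fun p => p.2)) := rfl
    rw [hupd]
    by_cases hd : d.contains p.2
    · rw [if_neg (by simp [hd]), PySem.Dict.keys_modify,
        PySem.Dict.keys_insert_of_contains d _ hd]
      have : PySem.Set.add d.keys p.2 = d.keys := by
        simp [PySem.Set.add, List.elem_eq_contains, List.contains_iff_mem,
          (PySem.Dict.contains_iff_mem_keys d p.2).mp hd]
      rw [this]
    · rw [if_pos (by simp [hd]), PySem.Dict.keys_insert_of_not_contains d _ (by simpa using hd)]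
      have : PySem.Set.add d.keys p.2 = d.keys ++ [p.2] := by
        have hmem : p.2 ∉ d.keys := fun hm =>
          hd ((PySem.Dict.contains_iff_mem_keys d p.2).mpr hm)
        simp [PySem.Set.add, List.elem_eq_contains, List.contains_iff_mem, hmem]
      rw [this]

theorem B_getD (log : List (String × String)) (e : String) :
    (log.foldl (fun d p => d.modify p.2 [] (fun ls => ls ++ [p.1])) PySem.Dict.empty).getD e [] = numsOf e log := by
  have h := PySem.Dict.getD_foldl_modify_append (log.map (fun p => (p.2, p.1))) PySem.Dict.empty e
  rw [List.foldl_map] at h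
  simp only [h, PySem.Dict.getD_empty, List.nil_append, List.filter_map, numsOf, List.map_map]
  rfl


theorem zip_map_self {α β : Type} (l : List α) (f : α → β) :
    (l.map f).zip l = l.map (fun x => (f x, x)) := by
  induction l with
  | nil => rfl
  | cons a l ih => simp [ih]


set_option maxHeartbeats 1000000 in
theorem main (log : List (String × String)) (hpre : Pre_hacker log) :
    hacker log = hacker_alt log := by
  have hA : hacker log = PySem.List.sorted2
      (((log.foldl stepA PySem.Dict.empty).keys.map
          (fun x => String.ofList ((log.foldl stepA PySem.Dict.empty).getD x []))).zip
        (log.foldl stepA PySem.Dict.empty).keys)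
      (fun n => PySem.Str.count n.1 "*") (fun n => n.2) := rfl
  set G := log.foldl (fun d p => d.modify p.2 [] (fun ls => ls ++ [p.1])) PySem.Dict.empty with hGdef
  have hGnodup : G.keys.Nodup := by
    apply PySem.Dict.nodup_keys_foldl_modify_key log (fun p => p.2) ([] : List String)
      (fun d p ls => ls ++ [p.1]) PySem.Dict.empty
    simp
  have hB : hacker_alt log = PySem.List.sorted2
      (G.keys.map (fun e => (mergeGroup (G.getD e []), e)))
      (fun n => PySem.Str.count n.1 "*") (fun n => n.2) := by
    show PySem.List.sorted2 (G.items.map (fun q => (mergeGroup q.2, q.1))) _ _ = _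
    rw [PySem.Dict.items_eq_map_keys G hGnodup ([] : List String), List.map_map]
    rfl
  rw [hA, hB, zip_map_self]
  congr 1
  have hkeysA : (log.foldl stepA PySem.Dict.empty).keys
      = PySem.Set.update ([] : List String) (log.map (fun p => p.2)) := by
    rw [A_keys]; rfl
  have hkeysB : G.keys = PySem.Set.update ([] : List String) (log.map (fun p => p.2)) := by
    rw [hGdef, PySem.Dict.keys_foldl_modify_key log (fun p => p.2) ([] : List String)
      (fun d p ls => ls ++ [p.1]) PySem.Dict.empty]
    rfl
  rw [hkeysA, hkeysB]
  apply List.map_congr_left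
  intro e he
  have hmem : e ∈ log.map (fun p => p.2) := by
    have : PySem.Set.update ([] : List String) (log.map (fun p => p.2))
        = PySem.Set.ofList (log.map (fun p => p.2)) := (PySem.Set.ofList_eq_foldl _)
    rw [this] at he
    exact (PySem.Set.mem_ofList _ _).mp he
  obtain ⟨p, hp, hpe⟩ := List.mem_map.mp hmem
  have hne : numsOf e log ≠ [] := by
    have : p.1 ∈ numsOf e log := by
      apply List.mem_map_of_mem
      exact List.mem_filter.mpr ⟨hp, by simp [hpe]⟩
    intro h; rw [h] at this; exact List.not_mem_nil this
  obtain ⟨f, rest, hfr⟩ : ∃ f rest, numsOf e log = f :: rest := by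
    cases h : numsOf e log with
    | nil => exact absurd h hne
    | cons f rest => exact ⟨f, rest, rfl⟩
  have hDgetD : (log.foldl stepA PySem.Dict.empty).getD e []
      = rest.foldl (fun acc n => applyEntry n acc) f.toList := by
    rw [A_getD, hfr]
    simp [groupFold]
  have hGgetD : G.getD e [] = f :: rest := by rw [hGdef, B_getD, hfr]
  rw [hDgetD, hGgetD]
  have H : ∀ n ∈ f :: rest, ∀ i, i < n.toList.length → n.toList.getD i '*' ≠ '*' → i < f.toList.length := by
    intro n hn i hi hc
    rw [← hfr] at hn
    obtain ⟨q, hq, hqn⟩ := List.mem_map.mp hn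
    obtain ⟨hqlog, hqe⟩ := List.mem_filter.mp hq
    have hq2 : q.2 = e := by simpa using hqe
    have := hpre q hqlog i (by rwa [hqn]) (by rwa [hqn])
    rw [hq2] at this
    have hhead : (((log.filter (fun r => r.2 == e)).map (fun r => r.1)).headD "") = f := by
      have : (log.filter (fun r => r.2 == e)).map (fun r => r.1) = f :: rest := by
        rw [← hfr]; rfl
      rw [this]; rfl
    rwa [hhead] at this
  exact congrArg (fun s => (s, e)) (merge_eq f rest H)


-- ===== VERDICT (by name: the statement is the Claim_ definition above) =====
theorem hacker_spec : Claim_equal_hacker := by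
  intro log _ hpre
  show hacker log = hacker_alt log
  exact main log hpre
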